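-- pv_equiv track=rewrite | github.com/google-research/python-graphs | python_graphs/control_flow_test_components.py | nested_loops
-- ===== SOURCE A (Python) =====
-- def nested_loops(a):
--   """A test function illustrating nested loops."""
--   for i in range(a):
--     while True:
--       break
--       unreachable = 10
--     for j in range(i):
--       for k in range(j):
--         if j * k > 10:
--           continue
--           unreachable = 5
--       if i + j == 10:
--         return True
--   return False
-- ===== SOURCE B (Python) =====
-- def nested_loops(a):
--   """Same result: keep the outer loop, compute the unique partner j = 10 - i directly."""
--   for i in range(a):
--     j = 10 - i
--     if 0 <= j < i:
--       return True
--   return False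
-- ===== Notes on version B (the rewrite author's own statement) =====
-- stated objective: simpler
-- what changed: The nested j/k scans and the dead while/continue code are deleted; inside the outer loop B computes the unique partner value for the current index and checks it with one arithmetic comparison.
import Mathlib
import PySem

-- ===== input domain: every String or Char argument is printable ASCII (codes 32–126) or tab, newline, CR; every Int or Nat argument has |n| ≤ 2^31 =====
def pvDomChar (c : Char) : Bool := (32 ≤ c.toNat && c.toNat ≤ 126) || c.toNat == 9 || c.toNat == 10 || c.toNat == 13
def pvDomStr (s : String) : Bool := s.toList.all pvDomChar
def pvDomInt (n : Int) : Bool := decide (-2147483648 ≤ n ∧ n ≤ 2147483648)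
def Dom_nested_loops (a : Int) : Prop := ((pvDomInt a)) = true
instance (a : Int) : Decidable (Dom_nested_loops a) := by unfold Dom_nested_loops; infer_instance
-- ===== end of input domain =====

-- B deletes A's nested j/k scans and dead code: the outer loop stays, and the unique
-- partner j = 10 - i is checked arithmetically (simpler, and asymptotically less work).

-- ===== PORT A =====
-- inner 'for j in range(i)' loop body: the k-loop computes nothing (its only statement
-- after 'continue' is unreachable), then returns True on i + j == 10
def pvA_inner (i : Int) : List Int → Bool
  | [] => false
  | j :: rest =>
    let _ := (PySem.List.pyRange 0 j 1).foldl (fun (u : Unit) k => if j * k > 10 then u else u) ()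
    if i + j == 10 then true else pvA_inner i rest

-- outer 'for i in range(a)' loop, i counting up ('while True: break' has no effect);
-- the loop exits early on return True, so it is a counter recursion
def pvA_outer (i a : Int) : Bool :=
  if i < a then
    if pvA_inner i (PySem.List.pyRange 0 i 1) then true else pvA_outer (i + 1) a
  else false
termination_by (a - i).toNat
decreasing_by omega

def nested_loops (a : Int) : Bool := pvA_outer 0 a

-- ===== PORT B =====
def pvB_go (i a : Int) : Bool :=
  if i < a then
    let j := 10 - i
    if 0 ≤ j ∧ j < i then true else pvB_go (i + 1) a
  else false
termination_by (a - i).toNat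
decreasing_by omega

def nested_loops_alt (a : Int) : Bool := pvB_go 0 a

-- ===== PRECONDITION & SPEC =====
def Spec_nested_loops (a : Int) (out : Bool) : Prop := out = nested_loops_alt a
instance (a : Int) (out : Bool) : Decidable (Spec_nested_loops a out) := by unfold Spec_nested_loops; infer_instance

-- ===== CLAIM (what is proved, stated in full; the proofs are below) =====
def Claim_equal_nested_loops : Prop := ∀ (a : Int), Dom_nested_loops a → Spec_nested_loops a (nested_loops a)

-- ===== LEMMAS AND PROOFS =====

theorem pvA_inner_eq_any (i : Int) (js : List Int) :
    pvA_inner i js = js.any (fun j => i + j == 10) := by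
  induction js with
  | nil => rfl
  | cons j rest ih =>
    simp [pvA_inner, List.any_cons, ih]
    by_cases h : i + j = 10 <;> simp [h]

theorem pvA_inner_range (i : Int) :
    pvA_inner i (PySem.List.pyRange 0 i 1) = decide (0 ≤ 10 - i ∧ 10 - i < i) := by
  rw [pvA_inner_eq_any, Bool.eq_iff_iff]
  simp only [List.any_eq_true, PySem.List.mem_pyRange_one, beq_iff_eq, decide_eq_true_eq]
  constructor
  · rintro ⟨j, ⟨h0, h1⟩, h2⟩; omega
  · rintro ⟨h0, h1⟩; exact ⟨10 - i, ⟨h0, h1⟩, by omega⟩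

theorem pvA_eq_pvB (i a : Int) : pvA_outer i a = pvB_go i a := by
  fun_induction pvA_outer i a with
  | case1 i hlt ht =>
    rw [pvB_go]
    rw [pvA_inner_range] at ht
    simp only [decide_eq_true_eq] at ht
    simp only [hlt, if_pos]
    rw [if_pos (show 0 ≤ 10 - i ∧ 10 - i < i from ht)]
  | case2 i hlt hf ih =>
    rw [pvA_inner_range] at hf
    have hf' : ¬ (0 ≤ 10 - i ∧ 10 - i < i) := by simpa using hf
    rw [pvB_go, if_pos hlt]
    show pvA_outer (i + 1) a = if 0 ≤ 10 - i ∧ 10 - i < i then true else pvB_go (i + 1) a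
    rw [if_neg hf', ih]
  | case3 i hge =>
    rw [pvB_go]
    simp [hge]

-- ===== VERDICT (by name: the statement is the Claim_ definition above) =====
theorem nested_loops_spec : Claim_equal_nested_loops := by
  intro a _
  unfold Spec_nested_loops nested_loops nested_loops_alt
  exact pvA_eq_pvB 0 a
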